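-- pv_equiv track=rewrite | github.com/yeafla530/algorithms | 프로그래머스/PCCP모의고사/1회/1_외톨이알파벳.py | solution
-- ===== SOURCE A (Python) =====
-- from collections import defaultdict
--
-- def solution(input_string):
--     answer = ''
--     d = defaultdict()
--
--     # hash저장
--     for elem in input_string:
--         if elem not in d:
--             d[elem] = 0
--
--
--     # 기준 문자
--     basic_string = input_string[0]
--     # 전체 문자 돌기
--     for i in range(1, len(input_string)):
--         if basic_string != input_string[i]:
--             d[basic_string] += 1
--             basic_string = input_string[i]
--
--         if i == len(input_string)-1:
--             d[input_string[i]] += 1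
--
--
--     for key in d.keys():
--         if d[key] >= 2:
--             answer += key
--
--
--     if answer:
--         answer = list(answer)
--         answer.sort()
--
--         answer = ''.join(answer)
--
--     else:
--         answer = 'N'
--
--     return answer
-- ===== SOURCE B (Python) =====
-- def solution(input_string):
--     # a character is lonely iff it still occurs after cutting off everything up to
--     # and including its first run of that character
--     def multi_run(c):
--         rest = input_string[input_string.index(c):].lstrip(c)
--         return c in rest
--     lonely = sorted(c for c in set(input_string) if multi_run(c))
--     return ''.join(lonely) if lonely else 'N'
-- ===== Notes on version B (the rewrite author's own statement) =====
-- stated objective: alternative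
-- what changed: B drops A's single left-to-right pass with a run-boundary dict entirely: it decides each distinct character independently by string queries (index of its first occurrence, slice, lstrip its first run, membership test on the remainder), then sorts the survivors.
-- crash fix: On the empty string A raises IndexError (it reads input_string[0]); B returns the no-lonely-letter answer 'N'. — e.g. on solution(""): A raises IndexError, B returns "N"
import Mathlib
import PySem

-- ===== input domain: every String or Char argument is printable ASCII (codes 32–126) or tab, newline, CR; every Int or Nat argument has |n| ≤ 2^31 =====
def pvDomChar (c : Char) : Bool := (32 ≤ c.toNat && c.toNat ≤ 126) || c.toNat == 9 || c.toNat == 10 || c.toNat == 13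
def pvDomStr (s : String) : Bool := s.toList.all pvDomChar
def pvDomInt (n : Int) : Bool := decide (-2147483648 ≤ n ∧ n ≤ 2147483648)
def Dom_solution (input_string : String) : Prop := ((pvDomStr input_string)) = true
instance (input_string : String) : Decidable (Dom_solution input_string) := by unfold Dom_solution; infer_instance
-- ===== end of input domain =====

-- B replaces A's single pass (run-boundary counting into a dict) by an independent per-character
-- test: a character is lonely iff it still occurs after cutting off everything up to and including
-- its first run (index / slice / lstrip / membership); equivalence is claimed on non-empty strings
-- (A raises IndexError on "", where B returns "N" — see Raises_solution).

-- ===== PORT A =====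
-- the for-i-in-range(1, len) loop over the tail; the [x] case is the iteration with i == len(input_string)-1
def solLoop (basic : Char) (t : List Char) (d : PySem.Dict Char Int) : PySem.Dict Char Int :=
  match t with
  | [] => d
  | [x] =>
    let p : Char × PySem.Dict Char Int :=
      if basic ≠ x then (x, d.insert basic (d.getD basic 0 + 1)) else (basic, d)
    p.2.insert x (p.2.getD x 0 + 1)
  | x :: y :: rest =>
    if basic ≠ x then solLoop x (y :: rest) (d.insert basic (d.getD basic 0 + 1))
    else solLoop basic (y :: rest) d

def solution (input_string : String) : String :=
  let l := input_string.toList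
  let d0 : PySem.Dict Char Int :=
    l.foldl (fun d e => if d.contains e = false then d.insert e 0 else d) PySem.Dict.empty
  match l with
  | [] => ""
  | b :: t =>
    let d := solLoop b t d0
    let answer : List Char :=
      d.keys.foldl (fun acc k => if 2 ≤ d.getD k 0 then acc ++ [k] else acc) []
    if answer ≠ [] then String.ofList (PySem.List.sorted answer (fun x => x) false) else "N"

-- ===== PORT B =====
def solution_alt (input_string : String) : String :=
  let l := input_string.toList
  -- multi_run(c): rest = input_string[input_string.index(c):].lstrip(c); return c in rest
  -- (c comes from set(input_string), so c ∈ l and index(c) succeeds = l.idxOf c; the slice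
  --  from it is l.drop; lstrip with the single char c drops the leading chars equal to c;
  --  'c in rest' with a single char is membership — all exact here)
  let multiRun : Char → Bool := fun c =>
    ((l.drop (l.idxOf c)).dropWhile (fun x => x == c)).contains c
  let lonely :=
    PySem.List.sorted ((PySem.Set.ofList l).filter multiRun) (fun x => x) false
  if lonely ≠ [] then String.ofList lonely else "N"

-- ===== PRECONDITION & SPEC =====
-- A reads input_string[0] before its second loop, so it raises IndexError on the empty string.
def Pre_solution (input_string : String) : Prop := input_string ≠ ""
instance (input_string : String) : Decidable (Pre_solution input_string) := by unfold Pre_solution; infer_instance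
def pvWitness_solution : String := "aabaa"

-- On the empty string A raises IndexError (it reads input_string[0]); B returns "N".
def Raises_solution (input_string : String) : Prop := input_string = ""
instance (input_string : String) : Decidable (Raises_solution input_string) := by unfold Raises_solution; infer_instance
def pvRaiseWitness_solution : String := ""
def pvRaiseWitnessOut_solution : String := "N"

def Spec_solution (input_string : String) (out : String) : Prop := out = solution_alt input_string
instance (input_string : String) (out : String) : Decidable (Spec_solution input_string out) := by unfold Spec_solution; infer_instance

-- ===== CLAIM (what is proved, stated in full; the proofs are below) =====
def Claim_equal_solution : Prop := ∀ (input_string : String), Dom_solution input_string → Pre_solution input_string → Spec_solution input_string (solution input_string)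
def Claim_raises_solution : Prop := (∀ (input_string : String), Dom_solution input_string → Raises_solution input_string → ¬ Pre_solution input_string) ∧ (Dom_solution (pvRaiseWitness_solution) ∧ Raises_solution (pvRaiseWitness_solution) ∧ solution_alt (pvRaiseWitness_solution) = pvRaiseWitnessOut_solution)

-- ===== LEMMAS AND PROOFS =====

-- the sequence of run-leading characters of prev :: t, after the initial prev
def runLead (prev : Char) (t : List Char) : List Char :=
  match t with
  | [] => []
  | x :: t' => if x = prev then runLead prev t' else x :: runLead x t'

-- s[s.index(c):] is the suffix from the first occurrence of c
theorem drop_idxOf_eq_dropWhile (l : List Char) (c : Char) (h : c ∈ l) :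
    l.drop (l.idxOf c) = l.dropWhile (fun x => x != c) := by
  induction l with
  | nil => cases h
  | cons x l ih =>
    by_cases hx : x = c
    · subst hx
      simp [List.idxOf_cons_self, List.dropWhile_cons]
    · have hm : c ∈ l := by
        rcases List.mem_cons.mp h with h' | h'
        · exact absurd h'.symm hx
        · exact h'
      simp [List.idxOf_cons, hx, List.dropWhile_cons, bne, ih hm]

-- once the previous character differs from c, c is a later run leader iff it occurs at all
theorem mem_runLead_of_ne (u : List Char) (prev c : Char) (hp : prev ≠ c) :
    c ∈ runLead prev u ↔ c ∈ u := by
  induction u generalizing prev with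
  | nil => simp [runLead]
  | cons x u ih =>
    by_cases hx : x = prev
    · subst hx
      simp [runLead, ih _ hp, Ne.symm hp]
    · by_cases hc : x = c
      · subst hc
        simp [runLead, hx]
      · simp [runLead, hx, hc, ih _ hc]

-- c leads a later run iff c still occurs after its initial run
theorem mem_runLead_self (t : List Char) (c : Char) :
    c ∈ runLead c t ↔ c ∈ t.dropWhile (fun x => x == c) := by
  induction t with
  | nil => simp [runLead]
  | cons x t ih =>
    by_cases hx : x = c
    · subst hx
      simp [runLead, List.dropWhile_cons, ih]
    · simp [runLead, hx, List.dropWhile_cons, mem_runLead_of_ne t x c hx]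

-- with a non-c previous character, c leads ≥ 2 runs iff c survives cutting its first run
theorem count_runLead (t : List Char) (prev c : Char) (hp : prev ≠ c) :
    2 ≤ (runLead prev t).count c ↔
      c ∈ ((t.dropWhile (fun x => x != c)).dropWhile (fun x => x == c)) := by
  induction t generalizing prev with
  | nil => simp [runLead]
  | cons x t ih =>
    by_cases hc : x = c
    · subst hc
      have hxp : ¬ x = prev := fun h => hp (by rw [h])
      rw [show runLead prev (x :: t) = x :: runLead x t from by simp [runLead, hxp]]
      rw [List.count_cons, if_pos (by simp), List.dropWhile_cons]
      rw [if_neg (by simp), List.dropWhile_cons, if_pos (by simp)]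
      constructor
      · intro h
        exact (mem_runLead_self t x).mp (List.count_pos_iff.mp (by omega))
      · intro h
        have := List.count_pos_iff.mpr ((mem_runLead_self t x).mpr h)
        omega
    · by_cases hx : x = prev
      · subst hx
        simpa [runLead, List.dropWhile_cons, bne_iff_ne, hp] using ih x hp
      · simp only [runLead, if_neg hx, List.dropWhile_cons]
        rw [if_pos (by simp [bne, hc]), List.count_cons]
        rw [if_neg (by simpa using hc)]
        simpa using ih x hc

-- the combined characterisation of A's run count for the whole string b :: t
theorem leaders_count (b : Char) (t : List Char) (c : Char) :
    2 ≤ ((b :: runLead b t).count c) ↔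
      c ∈ (((b :: t).dropWhile (fun x => x != c)).dropWhile (fun x => x == c)) := by
  by_cases hb : b = c
  · subst hb
    rw [List.count_cons, if_pos (by simp), List.dropWhile_cons]
    rw [if_neg (by simp [bne]), List.dropWhile_cons, if_pos (by simp)]
    constructor
    · intro h
      exact (mem_runLead_self t b).mp (List.count_pos_iff.mp (by omega))
    · intro h
      have := List.count_pos_iff.mpr ((mem_runLead_self t b).mpr h)
      omega
  · rw [List.count_cons, if_neg (by simpa using hb), List.dropWhile_cons]
    rw [if_pos (by simp [bne, hb])]
    simpa using count_runLead t b c hb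

theorem prefill_getD (l : List Char) (d : PySem.Dict Char Int)
    (h : ∀ c, d.getD c 0 = 0) :
    ∀ c, (l.foldl (fun d e => if d.contains e = false then d.insert e 0 else d) d).getD c 0 = 0 := by
  induction l generalizing d with
  | nil => simpa using h
  | cons e l' ih =>
    intro c
    simp only [List.foldl_cons]
    cases hc : d.contains e with
    | false =>
      rw [if_pos rfl]
      refine ih _ (fun c' => ?_) c
      rw [PySem.Dict.getD_insert]
      split <;> simp [h]
    | true =>
      rw [if_neg (by simp)]
      exact ih _ h c

theorem prefill_mem_keys (l : List Char) (d : PySem.Dict Char Int) :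
    ∀ c, c ∈ (l.foldl (fun d e => if d.contains e = false then d.insert e 0 else d) d).keys ↔
      (c ∈ d.keys ∨ c ∈ l) := by
  induction l generalizing d with
  | nil => simp
  | cons e l' ih =>
    intro c
    simp only [List.foldl_cons]
    cases hc : d.contains e with
    | false =>
      rw [if_pos rfl, ih, PySem.Dict.mem_keys_insert]
      simp only [List.mem_cons]
      tauto
    | true =>
      rw [if_neg (by simp), ih]
      have hmem : e ∈ d.keys := (PySem.Dict.contains_iff_mem_keys d e).mp hc
      simp only [List.mem_cons]
      constructor
      · tauto
      · rintro (h | h | h)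
        · tauto
        · rw [h]; tauto
        · tauto

theorem prefill_nodup (l : List Char) (d : PySem.Dict Char Int) (h : d.keys.Nodup) :
    (l.foldl (fun d e => if d.contains e = false then d.insert e 0 else d) d).keys.Nodup := by
  induction l generalizing d with
  | nil => simpa using h
  | cons e l' ih =>
    simp only [List.foldl_cons]
    cases hc : d.contains e with
    | false => rw [if_pos rfl]; exact ih _ (PySem.Dict.nodup_keys_insert _ _ _ h)
    | true => rw [if_neg (by simp)]; exact ih _ h

theorem solLoop_getD (t : List Char) (b : Char) (d : PySem.Dict Char Int) (ht : t ≠ []) :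
    ∀ c, (solLoop b t d).getD c 0 =
      d.getD c 0 + ((b :: runLead b t).count c : Int) := by
  induction t generalizing b d with
  | nil => exact absurd rfl ht
  | cons x t' ih =>
    intro c
    match t' with
    | [] =>
      by_cases hx : b = x
      · subst hx
        simp only [solLoop]
        rw [if_neg (show ¬ b ≠ b by simp)]
        simp only [PySem.Dict.getD_insert, runLead, if_pos rfl, List.count_cons, List.count_nil]
        split_ifs <;> simp_all <;> push_cast <;> omega
      · simp only [solLoop]
        rw [if_pos (show b ≠ x from hx)]
        simp only [PySem.Dict.getD_insert, runLead, if_neg (Ne.symm hx : ¬ x = b),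
          List.count_cons, List.count_nil]
        split_ifs <;> simp_all <;> push_cast <;> omega
    | y :: rest =>
      by_cases hx : b = x
      · subst hx
        simp only [solLoop]
        rw [if_neg (show ¬ b ≠ b by simp), ih b d (by simp) c]
        simp [runLead]
      · simp only [solLoop]
        rw [if_pos (show b ≠ x from hx), ih x _ (by simp) c]
        simp only [PySem.Dict.getD_insert, runLead, if_neg (Ne.symm hx : ¬ x = b),
          List.count_cons]
        split_ifs <;> simp_all <;> push_cast <;> omega

theorem solLoop_keys (t : List Char) (b : Char) (d : PySem.Dict Char Int)
    (hb : b ∈ d.keys) (htk : ∀ x ∈ t, x ∈ d.keys) :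
    (solLoop b t d).keys = d.keys := by
  induction t generalizing b d with
  | nil => simp [solLoop]
  | cons x t' ih =>
    have hxk : x ∈ d.keys := htk x (by simp)
    have hck : ∀ (k : Char) (d' : PySem.Dict Char Int), k ∈ d'.keys →
        (d'.insert k (d'.getD k 0 + 1)).keys = d'.keys := by
      intro k d' hk
      exact PySem.Dict.keys_insert_of_contains d' _ ((PySem.Dict.contains_iff_mem_keys d' k).mpr hk)
    match t' with
    | [] =>
      by_cases hx : b = x
      · subst hx
        simp only [solLoop]
        rw [if_neg (show ¬ b ≠ b by simp)]
        exact hck b d hb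
      · simp only [solLoop]
        rw [if_pos (show b ≠ x from hx)]
        have h2 : (d.insert b (d.getD b 0 + 1)).keys = d.keys := hck b d hb
        rw [hck x _ (by rw [h2]; exact hxk)]
        exact h2
    | y :: rest =>
      by_cases hx : b = x
      · subst hx
        simp only [solLoop]
        rw [if_neg (show ¬ b ≠ b by simp)]
        exact ih b d hb (fun z hz => htk z (by simp [hz]))
      · simp only [solLoop]
        rw [if_pos (show b ≠ x from hx)]
        have h2 : (d.insert b (d.getD b 0 + 1)).keys = d.keys := hck b d hb
        rw [ih x _ (by rw [h2]; exact hxk)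
              (fun z hz => by rw [h2]; exact htk z (by simp [hz]))]
        exact h2

theorem solution_eq_core (b : Char) (t : List Char) :
    solution (String.ofList (b :: t)) = solution_alt (String.ofList (b :: t)) := by
  have hl : (String.ofList (b :: t)).toList = b :: t := String.toList_ofList
  set l := b :: t with hLdef
  set d0 : PySem.Dict Char Int := (l.foldl
      (fun d e => if d.contains e = false then d.insert e 0 else d) PySem.Dict.empty) with hd0
  have hd0get : ∀ c, d0.getD c 0 = 0 :=
    prefill_getD l PySem.Dict.empty (fun c => by simp [PySem.Dict.getD_empty])
  have hd0mem : ∀ c, c ∈ d0.keys ↔ c ∈ l := fun c =>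
    (prefill_mem_keys l PySem.Dict.empty c).trans (by simp [PySem.Dict.keys_empty])
  have hd0nodup : d0.keys.Nodup :=
    prefill_nodup l PySem.Dict.empty (by simp [PySem.Dict.keys_empty])
  set dA := solLoop b t d0 with hdA
  have hdAkeys : dA.keys = d0.keys :=
    solLoop_keys t b d0 ((hd0mem b).mpr (by rw [hLdef]; simp))
      (fun x hx => (hd0mem x).mpr (by rw [hLdef]; simp [hx]))
  have hdAget : ∀ c, dA.getD c 0 = if t = [] then 0 else (((b :: runLead b t).count c : Int)) := by
    intro c
    by_cases ht : t = []
    · subst ht; simp [hdA, solLoop, hd0get]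
    · rw [if_neg ht, hdA, solLoop_getD t b d0 ht c, hd0get]; ring
  set mR : Char → Bool := fun c =>
    ((l.drop (l.idxOf c)).dropWhile (fun x => x == c)).contains c with hmR
  -- the two filtered selections contain the same characters
  have hselmem : ∀ c,
      (c ∈ dA.keys.filter (fun k => decide (2 ≤ dA.getD k 0))) ↔
      (c ∈ (PySem.Set.ofList l).filter mR) := by
    intro c
    simp only [List.mem_filter, decide_eq_true_eq, PySem.Set.mem_ofList, hdAkeys, hd0mem]
    constructor
    · rintro ⟨hmem, hge⟩
      refine ⟨hmem, ?_⟩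
      by_cases ht : t = []
      · exfalso; rw [hdAget c, if_pos ht] at hge; omega
      · rw [hdAget c, if_neg ht] at hge
        have h2 : 2 ≤ ((b :: runLead b t).count c) := by exact_mod_cast hge
        rw [hmR]
        simp only [List.contains_iff_mem]
        rw [drop_idxOf_eq_dropWhile l c hmem]
        exact (leaders_count b t c).mp h2
    · rintro ⟨hmem, hR⟩
      refine ⟨hmem, ?_⟩
      rw [hmR] at hR
      simp only [List.contains_iff_mem] at hR
      rw [drop_idxOf_eq_dropWhile l c hmem] at hR
      have h2 := (leaders_count b t c).mpr hR
      have ht : t ≠ [] := by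
        rintro rfl
        simp only [runLead, List.count_cons, List.count_nil] at h2
        split_ifs at h2 <;> omega
      rw [hdAget c, if_neg ht]
      exact_mod_cast h2
  have hAnodup : (dA.keys.filter (fun k => decide (2 ≤ dA.getD k 0))).Nodup := by
    rw [hdAkeys]; exact hd0nodup.filter _
  have hBnodup : ((PySem.Set.ofList l).filter mR).Nodup :=
    (PySem.Set.nodup_ofList _).filter _
  have hperm : (dA.keys.filter (fun k => decide (2 ≤ dA.getD k 0))).Perm
      ((PySem.Set.ofList l).filter mR) :=
    (List.perm_ext_iff_of_nodup hAnodup hBnodup).mpr hselmem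
  have hsorted : PySem.List.sorted (dA.keys.filter (fun k => decide (2 ≤ dA.getD k 0))) (fun x => x) false
      = PySem.List.sorted ((PySem.Set.ofList l).filter mR) (fun x => x) false :=
    PySem.List.sorted_eq_sorted_of_perm _ _ _ (fun _ _ h => h) hperm
  have hnil : (dA.keys.filter (fun k => decide (2 ≤ dA.getD k 0)) = []) ↔
      ((PySem.Set.ofList l).filter mR = []) := by
    constructor <;> intro h
    · exact ((h ▸ hperm).symm).eq_nil
    · exact ((h ▸ hperm.symm).symm).eq_nil
  unfold solution
  rw [hl]
  show (if (dA.keys.foldl (fun acc k => if 2 ≤ dA.getD k 0 then acc ++ [k] else acc) []) ≠ ([] : List Char)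
        then String.ofList (PySem.List.sorted (dA.keys.foldl (fun acc k => if 2 ≤ dA.getD k 0 then acc ++ [k] else acc) []) (fun x => x) false) else "N")
      = solution_alt (String.ofList l)
  rw [PySem.List.foldl_append_ite_eq_filter]
  simp only [List.nil_append]
  unfold solution_alt
  rw [hl]
  dsimp only
  by_cases hA : dA.keys.filter (fun k => decide (2 ≤ dA.getD k 0)) = []
  · rw [if_neg (not_ne_iff.mpr hA),
        if_neg (not_ne_iff.mpr ((PySem.List.sorted_eq_nil_iff _ _ _).mpr (hnil.mp hA)))]
  · rw [if_pos hA, hsorted,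
        if_pos (fun h => hA (hnil.mpr ((PySem.List.sorted_eq_nil_iff _ _ _).mp h)))]

-- ===== VERDICT (by name: the statement is the Claim_ definition above) =====
theorem solution_spec : Claim_equal_solution := by
  intro s _ hpre
  unfold Spec_solution
  obtain ⟨b, t, hbt⟩ : ∃ b t, s.toList = b :: t := by
    cases h : s.toList with
    | nil =>
      exact absurd (by rw [← String.ofList_toList (s := s), h]) hpre
    | cons b t => exact ⟨b, t, rfl⟩
  have hs : s = String.ofList (b :: t) := by rw [← hbt]; exact (String.ofList_toList).symm
  rw [hs, solution_eq_core]

theorem solution_raises : Claim_raises_solution := by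
  unfold Claim_raises_solution
  exact ⟨fun s _ hr => by simp [Raises_solution, Pre_solution] at *; exact hr, by decide⟩

-- self-check: the stated crash-fix witness really lies in Raises_ and B's port returns "N" there
theorem pvRaiseWitness_ok :
    Raises_solution pvRaiseWitness_solution ∧
      solution_alt pvRaiseWitness_solution = pvRaiseWitnessOut_solution :=
  ⟨solution_raises.2.2.1, solution_raises.2.2.2⟩
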